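-- pv_equiv track=rewrite | github.com/Jonglee999/RequirementVIBE-LEE- | services/prompt_service.py | extract_volere_from_requirements
-- ===== SOURCE A (Python) =====
-- from typing import List, Dict, Any, Optional, Tuple
-- from collections import Counter
--
-- def extract_volere_from_requirements(requirements: List[Dict[str, Any]]) -> Dict[str, Any]:
--     """
--     Extract Volere fields from stored requirements to auto-fill known fields.
--
--     Args:
--         requirements: List of requirement dictionaries with 'volere' key
--
--     Returns:
--         dict: Dictionary with goal, context, stakeholder (most common values from requirements)
--     """
--     if not requirements:
--         return {
--             "goal": "Not stated",
--             "context": "Not asked",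
--             "stakeholder": "Unknown"
--         }
--
--     # Collect all volere fields from requirements
--     goals = []
--     contexts = []
--     stakeholders = []
--
--     for req in requirements:
--         volere = req.get("volere", {})
--         if volere.get("goal") and volere["goal"] not in ["Not stated", ""]:
--             goals.append(volere["goal"])
--         if volere.get("context") and volere["context"] not in ["Not asked", ""]:
--             contexts.append(volere["context"])
--         if volere.get("stakeholder") and volere["stakeholder"] not in ["Unknown", ""]:
--             stakeholders.append(volere["stakeholder"])
--
--     # Use most common value, or first if all are unique
--     def most_common(values):
--         if not values:
--             return None
--         counter = Counter(values)
--         return counter.most_common(1)[0][0]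
--
--     return {
--         "goal": most_common(goals) or "Not stated",
--         "context": most_common(contexts) or "Not asked",
--         "stakeholder": most_common(stakeholders) or "Unknown"
--     }
-- ===== SOURCE B (Python) =====
-- def extract_volere_from_requirements(requirements):
--     result = {}
--     for key, default in (("goal", "Not stated"), ("context", "Not asked"), ("stakeholder", "Unknown")):
--         # Online mode-finding: one pass keeping (count, first-seen rank) per value and
--         # the current winner; no Counter, no post-pass over counts.
--         stats = {}   # value -> (count, rank at first sighting)
--         best = None
--         n = 0        # accepted values seen so far
--         for req in requirements:
--             value = req.get("volere", {}).get(key)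
--             if not value or value == default:
--                 continue
--             count, first = stats.get(value, (0, n))
--             n += 1
--             stats[value] = (count + 1, first)
--             if best is None or (count + 1, -first) > (stats[best][0], -stats[best][1]):
--                 best = value
--         result[key] = default if best is None else best
--     return result
-- ===== Notes on version B (the rewrite author's own statement) =====
-- stated objective: alternative
-- what changed: Replaces A's collect-lists-then-Counter.most_common post-pass with an online mode-finder: per field one pass keeps (count, first-seen rank) per value in a dict and updates the running winner by a lexicographic (count, -rank) comparison, so no Counter and no selection pass over the counts exist.
import Mathlib
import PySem

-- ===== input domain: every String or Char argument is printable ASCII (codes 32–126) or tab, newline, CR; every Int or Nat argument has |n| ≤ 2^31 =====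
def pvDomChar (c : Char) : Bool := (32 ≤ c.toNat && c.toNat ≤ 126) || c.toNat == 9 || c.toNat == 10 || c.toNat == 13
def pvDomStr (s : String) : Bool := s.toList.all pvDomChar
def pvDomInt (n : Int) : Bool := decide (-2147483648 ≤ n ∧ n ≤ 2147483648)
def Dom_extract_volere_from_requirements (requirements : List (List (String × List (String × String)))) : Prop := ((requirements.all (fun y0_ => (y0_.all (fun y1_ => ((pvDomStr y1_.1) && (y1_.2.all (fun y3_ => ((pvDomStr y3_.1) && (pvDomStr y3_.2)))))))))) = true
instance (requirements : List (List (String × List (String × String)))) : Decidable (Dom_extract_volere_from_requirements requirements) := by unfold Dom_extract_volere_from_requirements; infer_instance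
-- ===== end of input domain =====

-- B replaces A's collect-then-Counter.most_common selection with an online per-field
-- mode-finder keeping (count, first-seen rank) and a running winner (objective: alternative, same cost).

-- ===== PORT A =====
-- Counter(values).most_common(1)[0][0]: first item (insertion order) with maximal count.
def pvBestStep (best : Option (String × Int)) (kc : String × Int) : Option (String × Int) :=
  match best with
  | none => some kc
  | some b => if kc.2 > b.2 then some kc else best

def pvMostCommon1? (items : List (String × Int)) : Option String :=
  (items.foldl pvBestStep none).map (·.1)

-- A's `most_common` helper: None on empty, else the most common value.
def pvMostCommonA (values : List String) : Option String :=
  if values = [] then none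
  else pvMostCommon1? (PySem.Dict.counter values).items

-- Python `x or d` on an Optional[str].
def pvOrStr (o : Option String) (d : String) : String :=
  match o with
  | some s => if s = "" then d else s
  | none => d

-- the body of A's `for req in requirements` loop (state = (goals, contexts, stakeholders))
def pvStepA (acc : List String × List String × List String)
    (req : List (String × List (String × String))) :
    List String × List String × List String :=
  let vd := PySem.Dict.mk ((PySem.Dict.mk req).getD "volere" [])
  let a1 := match vd.get? "goal" with
    | some s => if s ≠ "" ∧ s ∉ (["Not stated", ""] : List String) then (acc.1 ++ [s], acc.2.1, acc.2.2) else acc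
    | none => acc
  let a2 := match vd.get? "context" with
    | some s => if s ≠ "" ∧ s ∉ (["Not asked", ""] : List String) then (a1.1, a1.2.1 ++ [s], a1.2.2) else a1
    | none => a1
  match vd.get? "stakeholder" with
    | some s => if s ≠ "" ∧ s ∉ (["Unknown", ""] : List String) then (a2.1, a2.2.1, a2.2.2 ++ [s]) else a2
    | none => a2

def extract_volere_from_requirements (requirements : List (List (String × List (String × String)))) : List (String × String) :=
  if requirements = [] then
    [("goal", "Not stated"), ("context", "Not asked"), ("stakeholder", "Unknown")]
  else
    let acc := requirements.foldl pvStepA ([], [], [])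
    [("goal", pvOrStr (pvMostCommonA acc.1) "Not stated"),
     ("context", pvOrStr (pvMostCommonA acc.2.1) "Not asked"),
     ("stakeholder", pvOrStr (pvMostCommonA acc.2.2) "Unknown")]

-- ===== PORT B =====
-- the body of B's inner loop after the `continue` guard; state = (stats, best, n).
-- `stats[best]` indexes an existing key (best was inserted); ported totally via getD.
def pvCoreB (st : PySem.Dict String (Int × Int) × Option String × Int) (value : String) :
    PySem.Dict String (Int × Int) × Option String × Int :=
  let cf := st.1.getD value (0, st.2.2)
  let stats := st.1.insert value (cf.1 + 1, cf.2)
  let best : Option String :=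
    match st.2.1 with
    | none => some value
    | some b =>
        let bs := stats.getD b (0, 0)
        if cf.1 + 1 > bs.1 ∨ (cf.1 + 1 = bs.1 ∧ -cf.2 > -bs.2) then some value else st.2.1
  (stats, best, st.2.2 + 1)

-- one iteration of B's `for req in requirements` loop (the `continue` guard, then pvCoreB)
def pvBStep (key dflt : String)
    (st : PySem.Dict String (Int × Int) × Option String × Int)
    (req : List (String × List (String × String))) :
    PySem.Dict String (Int × Int) × Option String × Int :=
  match (PySem.Dict.mk ((PySem.Dict.mk req).getD "volere" [])).get? key with
  | none => st
  | some value => if value = "" ∨ value = dflt then st else pvCoreB st value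

def extract_volere_from_requirements_alt (requirements : List (List (String × List (String × String)))) : List (String × String) :=
  (([("goal", "Not stated"), ("context", "Not asked"), ("stakeholder", "Unknown")] : List (String × String)).foldl
    (fun (r : PySem.Dict String String) kd =>
      let st := requirements.foldl (pvBStep kd.1 kd.2) (PySem.Dict.empty, none, 0)
      r.insert kd.1 (match st.2.1 with | none => kd.2 | some b => b))
    PySem.Dict.empty).items

-- ===== PRECONDITION & SPEC =====
def Spec_extract_volere_from_requirements (requirements : List (List (String × List (String × String)))) (out : List (String × String)) : Prop := out = extract_volere_from_requirements_alt requirements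
instance (requirements : List (List (String × List (String × String)))) (out : List (String × String)) : Decidable (Spec_extract_volere_from_requirements requirements out) := by unfold Spec_extract_volere_from_requirements; infer_instance

-- ===== CLAIM (what is proved, stated in full; the proofs are below) =====
def Claim_equal_extract_volere_from_requirements : Prop := ∀ (requirements : List (List (String × List (String × String)))), Dom_extract_volere_from_requirements requirements → Spec_extract_volere_from_requirements requirements (extract_volere_from_requirements requirements)

-- ===== LEMMAS AND PROOFS =====

-- the value both loops act on for a given field, with the shared skip-guard
def pvVal? (key dflt : String) (req : List (String × List (String × String))) : Option String :=
  match (PySem.Dict.mk ((PySem.Dict.mk req).getD "volere" [])).get? key with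
  | none => none
  | some v => if v = "" ∨ v = dflt then none else some v

-- single-field version of A's loop step
def pvStep1 (key dflt : String) (l : List String) (req : List (String × List (String × String))) : List String :=
  match (PySem.Dict.mk ((PySem.Dict.mk req).getD "volere" [])).get? key with
  | some s => if s ≠ "" ∧ s ∉ ([dflt, ""] : List String) then l ++ [s] else l
  | none => l

lemma pvStepA_split (acc : List String × List String × List String)
    (req : List (String × List (String × String))) :
    pvStepA acc req = (pvStep1 "goal" "Not stated" acc.1 req,
                       pvStep1 "context" "Not asked" acc.2.1 req,
                       pvStep1 "stakeholder" "Unknown" acc.2.2 req) := by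
  rcases acc with ⟨g, c, s⟩
  rcases h1 : (PySem.Dict.mk ((PySem.Dict.mk req).getD "volere" [])).get? "goal" with _ | s1 <;>
    rcases h2 : (PySem.Dict.mk ((PySem.Dict.mk req).getD "volere" [])).get? "context" with _ | s2 <;>
      rcases h3 : (PySem.Dict.mk ((PySem.Dict.mk req).getD "volere" [])).get? "stakeholder" with _ | s3 <;>
        simp only [pvStepA, pvStep1, h1, h2, h3] <;> split_ifs <;> rfl

lemma pvFoldA_split (reqs : List (List (String × List (String × String))))
    (acc : List String × List String × List String) :
    reqs.foldl pvStepA acc = (reqs.foldl (pvStep1 "goal" "Not stated") acc.1,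
                              reqs.foldl (pvStep1 "context" "Not asked") acc.2.1,
                              reqs.foldl (pvStep1 "stakeholder" "Unknown") acc.2.2) := by
  induction reqs generalizing acc with
  | nil => rfl
  | cons r rs ih => simp only [List.foldl_cons, ih, pvStepA_split]

lemma pvStep1_eq_pvVal (key dflt : String) (l : List String) (req : List (String × List (String × String))) :
    pvStep1 key dflt l req = match pvVal? key dflt req with
      | some s => l ++ [s]
      | none => l := by
  unfold pvStep1 pvVal?
  rcases h : (PySem.Dict.mk ((PySem.Dict.mk req).getD "volere" [])).get? key with _ | v
  · rfl
  · simp only [List.mem_cons]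
    split_ifs with h1 h2 h2 <;> first | rfl | (exfalso; tauto)

lemma pvBStep_eq_pvVal (key dflt : String) (st : PySem.Dict String (Int × Int) × Option String × Int)
    (req : List (String × List (String × String))) :
    pvBStep key dflt st req = match pvVal? key dflt req with
      | some v => pvCoreB st v
      | none => st := by
  unfold pvBStep pvVal?
  rcases h : (PySem.Dict.mk ((PySem.Dict.mk req).getD "volere" [])).get? key with _ | v
  · rfl
  · by_cases hc : v = "" ∨ v = dflt <;> simp [hc]

lemma pvFoldStep1_filterMap (key dflt : String) (reqs : List (List (String × List (String × String))))
    (acc : List String) :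
    reqs.foldl (pvStep1 key dflt) acc = acc ++ reqs.filterMap (pvVal? key dflt) := by
  induction reqs generalizing acc with
  | nil => simp
  | cons r rs ih =>
    simp only [List.foldl_cons, List.filterMap_cons, pvStep1_eq_pvVal]
    rcases pvVal? key dflt r with _ | v
    · exact ih acc
    · rw [ih (acc ++ [v])]; simp

lemma pvFoldBStep_filterMap (key dflt : String) (reqs : List (List (String × List (String × String))))
    (st : PySem.Dict String (Int × Int) × Option String × Int) :
    reqs.foldl (pvBStep key dflt) st = (reqs.filterMap (pvVal? key dflt)).foldl pvCoreB st := by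
  induction reqs generalizing st with
  | nil => rfl
  | cons r rs ih =>
    simp only [List.foldl_cons, List.filterMap_cons, pvBStep_eq_pvVal]
    rcases pvVal? key dflt r with _ | v
    · exact ih st
    · simp [ih (pvCoreB st v)]

lemma pvVal_ne_empty (key dflt : String) (reqs : List (List (String × List (String × String)))) :
    ∀ v ∈ reqs.filterMap (pvVal? key dflt), v ≠ "" := by
  intro v hv
  rw [List.mem_filterMap] at hv
  obtain ⟨r, _, hr⟩ := hv
  unfold pvVal? at hr
  rcases hq : (PySem.Dict.mk ((PySem.Dict.mk r).getD "volere" [])).get? key with _ | w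
  · rw [hq] at hr; cases hr
  · rw [hq] at hr
    by_cases h : w = "" ∨ w = dflt
    · simp [h] at hr
    · simp [h] at hr
      subst hr
      exact fun he => h (Or.inl he)

-- (c, i) ≤ (cb, ib) in the (count, -first index) lexicographic order
def pvLexLe (c i cb ib : Int) : Prop := c < cb ∨ (c = cb ∧ ib ≤ i)

-- invariant of B's inner loop over the filtered value list l
def pvInv (l : List String) (st : PySem.Dict String (Int × Int) × Option String × Int) : Prop :=
  (∀ v : String, st.1.get? v = if v ∈ l then some ((l.count v : Int), (l.idxOf v : Int)) else none) ∧
  st.2.2 = (l.length : Int) ∧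
  (match st.2.1 with
   | none => l = []
   | some b => b ∈ l ∧ ∀ v ∈ l, pvLexLe (l.count v) (l.idxOf v) (l.count b) (l.idxOf b))

lemma pvInv_nil : pvInv [] (PySem.Dict.empty, none, 0) := by
  refine ⟨fun v => ?_, rfl, rfl⟩
  simp [PySem.Dict.get?_empty]

lemma count_append_single (l : List String) (x v : String) :
    ((l ++ [x]).count v : Int) = (l.count v : Int) + (if x = v then 1 else 0) := by
  simp [List.count_append, List.count_cons]

lemma idxOf_append_single_self (l : List String) (x : String) (h : x ∉ l) :
    (l ++ [x]).idxOf x = l.length := by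
  rw [List.idxOf_append_of_notMem h]; simp

lemma pvInv_step (l : List String) (x : String)
    (st : PySem.Dict String (Int × Int) × Option String × Int)
    (h : pvInv l st) : pvInv (l ++ [x]) (pvCoreB st x) := by
  obtain ⟨hg, hn, hb⟩ := h
  have hcx : ((l ++ [x]).count x : Int) = (l.count x : Int) + 1 := by
    rw [count_append_single]; simp
  have hcv : ∀ v : String, v ≠ x → ((l ++ [x]).count v : Int) = (l.count v : Int) := by
    intro v hv; rw [count_append_single]; simp [Ne.symm hv]
  have hiv : ∀ v : String, v ∈ l → (l ++ [x]).idxOf v = l.idxOf v :=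
    fun v hv => List.idxOf_append_of_mem hv
  -- the stored pair for x equals x's (count,firstIdx) in l ++ [x] minus the new occurrence
  have hcf : st.1.getD x (0, st.2.2) = ((l.count x : Int), ((l ++ [x]).idxOf x : Int)) := by
    rw [PySem.Dict.getD_eq_get?_getD, hg x]
    by_cases hx : x ∈ l
    · simp [hx, hiv x hx]
    · have : l.count x = 0 := List.count_eq_zero.2 hx
      simp [hx, this, idxOf_append_single_self l x hx, hn]
  constructor
  · -- stats component
    intro v
    show (st.1.insert x _).get? v = _
    rw [PySem.Dict.get?_insert]
    by_cases hvx : v = x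
    · subst hvx
      simp only [hcf]
      simp
    · rw [if_neg hvx, hg v]
      by_cases hvl : v ∈ l
      · have h0 : List.count v [x] = 0 := by
          simp [List.count_singleton]
          exact Ne.symm hvx
        simp [hvl, hiv v hvl, List.count_append, h0]
      · have : v ∉ l ++ [x] := by simp [hvl, hvx]
        simp [hvl, this]
  refine ⟨?_, ?_⟩
  · -- n component
    show st.2.2 + 1 = _
    rw [hn]
    simp
  -- best component
  have hb21 : (pvCoreB st x).2.1 = (match st.2.1 with
      | none => some x
      | some b =>
          if (st.1.getD x (0, st.2.2)).1 + 1 > ((st.1.insert x ((st.1.getD x (0, st.2.2)).1 + 1, (st.1.getD x (0, st.2.2)).2)).getD b (0, 0)).1 ∨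
             ((st.1.getD x (0, st.2.2)).1 + 1 = ((st.1.insert x ((st.1.getD x (0, st.2.2)).1 + 1, (st.1.getD x (0, st.2.2)).2)).getD b (0, 0)).1 ∧
              -(st.1.getD x (0, st.2.2)).2 > -((st.1.insert x ((st.1.getD x (0, st.2.2)).1 + 1, (st.1.getD x (0, st.2.2)).2)).getD b (0, 0)).2)
          then some x else st.2.1) := rfl
  rcases hbo : st.2.1 with _ | b
  · -- previous best: none, so l = []
    rw [hbo] at hb
    simp only at hb
    subst hb
    have : (pvCoreB st x).2.1 = some x := by rw [hb21, hbo]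
    rw [this]
    refine ⟨by simp, ?_⟩
    intro v hv
    simp only [List.nil_append, List.mem_singleton] at hv
    subst hv
    exact Or.inr ⟨rfl, le_refl _⟩
  · rw [hbo] at hb
    obtain ⟨hbl, hdom⟩ := hb
    -- the looked-up pair for b equals b's (count, firstIdx) in l ++ [x]
    have hbs : (st.1.insert x ((st.1.getD x (0, st.2.2)).1 + 1, (st.1.getD x (0, st.2.2)).2)).getD b (0, 0)
        = (((l ++ [x]).count b : Int), ((l ++ [x]).idxOf b : Int)) := by
      rw [PySem.Dict.getD_eq_get?_getD, PySem.Dict.get?_insert]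
      by_cases hbx : b = x
      · subst hbx
        simp only [hcf]
        simp
      · rw [if_neg hbx, hg b]
        have h0 : List.count b [x] = 0 := by
          simp [List.count_singleton]
          exact Ne.symm hbx
        simp [hbl, hiv b hbl, List.count_append, h0]
    have hxpair : st.1.getD x (0, st.2.2) = ((l.count x : Int), ((l ++ [x]).idxOf x : Int)) := hcf
    have hb21' : (pvCoreB st x).2.1 =
        if ((l.count x : Int) + 1 > ((l ++ [x]).count b : Int)) ∨
           ((l.count x : Int) + 1 = ((l ++ [x]).count b : Int) ∧
            -(((l ++ [x]).idxOf x : Int)) > -(((l ++ [x]).idxOf b : Int)))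
        then some x else some b := by
      rw [hb21, hbo]
      show (if (st.1.getD x (0, st.2.2)).1 + 1 > ((st.1.insert x ((st.1.getD x (0, st.2.2)).1 + 1, (st.1.getD x (0, st.2.2)).2)).getD b (0, 0)).1 ∨
              ((st.1.getD x (0, st.2.2)).1 + 1 = ((st.1.insert x ((st.1.getD x (0, st.2.2)).1 + 1, (st.1.getD x (0, st.2.2)).2)).getD b (0, 0)).1 ∧
               -(st.1.getD x (0, st.2.2)).2 > -((st.1.insert x ((st.1.getD x (0, st.2.2)).1 + 1, (st.1.getD x (0, st.2.2)).2)).getD b (0, 0)).2)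
            then some x else some b) = _
      rw [hbs, hxpair]
    rw [hb21']
    by_cases hC : ((l.count x : Int) + 1 > ((l ++ [x]).count b : Int)) ∨
        ((l.count x : Int) + 1 = ((l ++ [x]).count b : Int) ∧
         -(((l ++ [x]).idxOf x : Int)) > -(((l ++ [x]).idxOf b : Int)))
    · rw [if_pos hC]
      refine ⟨by simp, ?_⟩
      intro v hv
      rw [List.mem_append, List.mem_singleton] at hv
      by_cases hvx : v = x
      · subst hvx; exact Or.inr ⟨rfl, le_refl _⟩
      · have hvl : v ∈ l := hv.resolve_right hvx
        have hold := hdom v hvl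
        have hcvv := hcv v hvx
        have hivv : ((l ++ [x]).idxOf v : Int) = (l.idxOf v : Int) := by rw [hiv v hvl]
        by_cases hbx : b = x
        · subst hbx
          unfold pvLexLe at hold ⊢
          omega
        · have hcb := hcv b hbx
          have hib : ((l ++ [x]).idxOf b : Int) = (l.idxOf b : Int) := by rw [hiv b hbl]
          unfold pvLexLe at hold ⊢
          omega
    · rw [if_neg hC]
      refine ⟨List.mem_append.2 (Or.inl hbl), ?_⟩
      intro v hv
      rw [List.mem_append, List.mem_singleton] at hv
      by_cases hbx : b = x
      · -- b = x: its count grew; old domination still gives domination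
        subst hbx
        by_cases hvx : v = b
        · subst hvx; exact Or.inr ⟨rfl, le_refl _⟩
        · have hvl : v ∈ l := hv.resolve_right hvx
          have hold := hdom v hvl
          have hcvv := hcv v hvx
          have hivv : ((l ++ [b]).idxOf v : Int) = (l.idxOf v : Int) := by rw [hiv v hvl]
          unfold pvLexLe at hold ⊢
          omega
      · have hcb := hcv b hbx
        have hib : ((l ++ [x]).idxOf b : Int) = (l.idxOf b : Int) := by rw [hiv b hbl]
        by_cases hvx : v = x
        · subst hvx
          unfold pvLexLe
          omega
        · have hvl : v ∈ l := hv.resolve_right hvx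
          have hold := hdom v hvl
          have hcvv := hcv v hvx
          have hivv : ((l ++ [x]).idxOf v : Int) = (l.idxOf v : Int) := by rw [hiv v hvl]
          unfold pvLexLe at hold ⊢
          omega

lemma pvInv_foldl (l : List String) :
    pvInv l (l.foldl pvCoreB (PySem.Dict.empty, none, 0)) := by
  induction l using List.reverseRecOn with
  | nil => exact pvInv_nil
  | append_singleton l x ih =>
    rw [List.foldl_append]
    exact pvInv_step l x _ ih

-- the Set.ofList of l is ordered by first-occurrence index
lemma pvOfList_pairwise (l : List String) :
    (PySem.Set.ofList l).Pairwise (fun a b => l.idxOf a < l.idxOf b) := by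
  induction l using List.reverseRecOn with
  | nil => simp [PySem.Set.ofList_nil]
  | append_singleton l x ih =>
    rw [PySem.Set.ofList_append_singleton, PySem.Set.add_eq_ite]
    have hmem : ∀ a ∈ PySem.Set.ofList l, a ∈ l := fun a ha => (PySem.Set.mem_ofList _ _).1 ha
    by_cases hx : x ∈ PySem.Set.ofList l
    · rw [if_pos hx]
      refine ih.imp_of_mem ?_
      intro a b ha hb hab
      rw [List.idxOf_append_of_mem (hmem a ha), List.idxOf_append_of_mem (hmem b hb)]
      exact hab
    · rw [if_neg hx]
      rw [List.pairwise_append]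
      refine ⟨ih.imp_of_mem ?_, List.pairwise_singleton _ _, ?_⟩
      · intro a b ha hb hab
        rw [List.idxOf_append_of_mem (hmem a ha), List.idxOf_append_of_mem (hmem b hb)]
        exact hab
      · intro a ha b hb
        rw [List.mem_singleton] at hb
        have hal : a ∈ l := hmem a ha
        have hxl : x ∉ l := fun hc => hx ((PySem.Set.mem_ofList _ _).2 hc)
        rw [hb, List.idxOf_append_of_mem hal, idxOf_append_single_self l x hxl]
        exact List.idxOf_lt_length_of_mem hal

-- the strict-greater fold keeps the earliest maximum
lemma pvFoldBest_some (idx : String → Int) :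
    ∀ (items : List (String × Int)) (b : String × Int),
    items.Pairwise (fun p q => idx p.1 < idx q.1) →
    (∀ q ∈ items, idx b.1 < idx q.1) →
    ∃ r, items.foldl pvBestStep (some b) = some r ∧
      (r = b ∨ r ∈ items) ∧
      (b.2 < r.2 ∨ (b.2 = r.2 ∧ idx r.1 ≤ idx b.1)) ∧
      ∀ q ∈ items, q.2 < r.2 ∨ (q.2 = r.2 ∧ idx r.1 ≤ idx q.1) := by
  intro items
  induction items with
  | nil =>
    intro b _ _
    exact ⟨b, rfl, Or.inl rfl, Or.inr ⟨rfl, le_refl _⟩, by simp⟩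
  | cons kc rest ih =>
    intro b hp hlt
    rw [List.pairwise_cons] at hp
    have hbkc : idx b.1 < idx kc.1 := hlt kc List.mem_cons_self
    simp only [List.foldl_cons]
    by_cases hgt : kc.2 > b.2
    · have hstep : pvBestStep (some b) kc = some kc := by simp [pvBestStep, hgt]
      rw [hstep]
      obtain ⟨r, hr, hmem, hdomb, hdomall⟩ := ih kc hp.2 hp.1
      refine ⟨r, hr, ?_, ?_, ?_⟩
      · rcases hmem with h | h
        · exact Or.inr (h ▸ List.mem_cons_self)
        · exact Or.inr (List.mem_cons_of_mem _ h)
      · rcases hdomb with h | h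
        · exact Or.inl (by omega)
        · exact Or.inl (by omega)
      · intro q hq
        rcases List.mem_cons.1 hq with h | h
        · subst h; exact hdomb
        · exact hdomall q h
    · have hstep : pvBestStep (some b) kc = some b := by simp [pvBestStep, hgt]
      rw [hstep]
      obtain ⟨r, hr, hmem, hdomb, hdomall⟩ := ih b hp.2 (fun q hq => hlt q (List.mem_cons_of_mem _ hq))
      refine ⟨r, hr, ?_, hdomb, ?_⟩
      · rcases hmem with h | h
        · exact Or.inl h
        · exact Or.inr (List.mem_cons_of_mem _ h)
      · intro q hq
        rcases List.mem_cons.1 hq with h | h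
        · subst h
          rcases hdomb with h | h
          · exact Or.inl (by omega)
          · by_cases he : q.2 = r.2
            · exact Or.inr ⟨he, by omega⟩
            · exact Or.inl (by omega)
        · exact hdomall q h

-- A's most-common pick on a nonempty l: the (count, -firstIdx)-maximal element
lemma pvMostCommonA_spec (l : List String) (hne : l ≠ []) :
    ∃ r, pvMostCommonA l = some r ∧ r ∈ l ∧
      ∀ v ∈ l, pvLexLe (l.count v) (l.idxOf v) (l.count r) (l.idxOf r) := by
  have hitems : (PySem.Dict.counter l).items
      = (PySem.Set.ofList l).map (fun k => (k, (l.count k : Int))) := PySem.Dict.items_counter l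
  have hpw : ((PySem.Set.ofList l).map (fun k => (k, (l.count k : Int)))).Pairwise
      (fun p q => (l.idxOf p.1 : Int) < (l.idxOf q.1 : Int)) := by
    rw [List.pairwise_map]
    exact (pvOfList_pairwise l).imp (by intro a b h; exact_mod_cast h)
  rcases hD : (PySem.Set.ofList l).map (fun k => (k, (l.count k : Int))) with _ | ⟨kc, rest⟩
  · -- impossible: l nonempty means ofList l nonempty
    exfalso
    rcases l with _ | ⟨y, ys⟩
    · exact hne rfl
    · have : y ∈ PySem.Set.ofList (y :: ys) := (PySem.Set.mem_ofList _ _).2 List.mem_cons_self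
      have := List.mem_map_of_mem (f := fun k => (k, ((y :: ys).count k : Int))) this
      rw [hD] at this
      exact absurd this (List.not_mem_nil)
  · rw [hD] at hpw
    rw [List.pairwise_cons] at hpw
    obtain ⟨r, hr, hmem, _, hdomall⟩ :=
      pvFoldBest_some (fun s => (l.idxOf s : Int)) rest kc hpw.2 hpw.1
    have hrmem : r ∈ (PySem.Set.ofList l).map (fun k => (k, (l.count k : Int))) := by
      rw [hD]
      rcases hmem with h | h
      · exact h ▸ List.mem_cons_self
      · exact List.mem_cons_of_mem _ h
    rw [List.mem_map] at hrmem
    obtain ⟨k, hk, hke⟩ := hrmem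
    have hkl : k ∈ l := (PySem.Set.mem_ofList _ _).1 hk
    refine ⟨r.1, ?_, ?_, ?_⟩
    · unfold pvMostCommonA pvMostCommon1?
      rw [if_neg hne, hitems, hD]
      simp only [List.foldl_cons]
      have : pvBestStep none kc = some kc := rfl
      rw [this, hr, Option.map_some]
    · rw [← hke]
      exact hkl
    · intro v hv
      have hvD : (v, (l.count v : Int)) ∈ (PySem.Set.ofList l).map (fun k => (k, (l.count k : Int))) :=
        List.mem_map_of_mem ((PySem.Set.mem_ofList _ _).2 hv)
      rw [hD] at hvD
      have hdomv : ((v, (l.count v : Int)) : String × Int).2 < r.2 ∨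
          ((v, (l.count v : Int)) : String × Int).2 = r.2 ∧ (l.idxOf r.1 : Int) ≤ (l.idxOf v : Int) := by
        rcases List.mem_cons.1 hvD with h | h
        · -- v's pair is the head kc: the fold started at kc so r dominates it
          obtain ⟨r', hr', hmem', hdomb', hdomall'⟩ :=
            pvFoldBest_some (fun s => (l.idxOf s : Int)) rest kc hpw.2 hpw.1
          rw [hr'] at hr
          cases hr
          rw [← h] at hdomb'
          exact hdomb'
        · exact hdomall _ h
      have hrc : r.2 = (l.count r.1 : Int) := by rw [← hke]
      unfold pvLexLe
      simp only at hdomv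
      rw [hrc] at hdomv
      exact_mod_cast hdomv

-- uniqueness of the (count, -firstIdx) maximum
lemma pvArgmax_unique (l : List String) (b r : String) (hb : b ∈ l) (hr : r ∈ l)
    (h1 : pvLexLe (l.count b) (l.idxOf b) (l.count r) (l.idxOf r))
    (h2 : pvLexLe (l.count r) (l.idxOf r) (l.count b) (l.idxOf b)) : b = r := by
  have hidx : l.idxOf b = l.idxOf r := by
    unfold pvLexLe at h1 h2; omega
  have h1' := List.getElem?_idxOf hb
  have h2' := List.getElem?_idxOf hr
  rw [hidx, h2'] at h1'
  exact (Option.some_inj.1 h1').symm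

-- per-field agreement of the two loops
lemma pvField_eq (key dflt : String) (reqs : List (List (String × List (String × String)))) :
    pvOrStr (pvMostCommonA (reqs.foldl (pvStep1 key dflt) [])) dflt
      = (match (reqs.foldl (pvBStep key dflt) (PySem.Dict.empty, none, 0)).2.1 with
         | none => dflt
         | some b => b) := by
  rw [pvFoldStep1_filterMap, pvFoldBStep_filterMap, List.nil_append]
  set l := reqs.filterMap (pvVal? key dflt) with hl
  have hinv := pvInv_foldl l
  obtain ⟨_, _, hbest⟩ := hinv
  rcases hbo : (l.foldl pvCoreB (PySem.Dict.empty, none, 0)).2.1 with _ | b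
  · rw [hbo] at hbest
    simp only at hbest
    rw [hbest]
    rfl
  · rw [hbo] at hbest
    obtain ⟨hbl, hdom⟩ := hbest
    have hne : l ≠ [] := fun h => by rw [h] at hbl; exact absurd hbl (List.not_mem_nil)
    obtain ⟨r, hr, hrl, hrdom⟩ := pvMostCommonA_spec l hne
    have hbr : b = r := pvArgmax_unique l b r hbl hrl (hrdom b hbl) (hdom r hrl)
    rw [hr]
    have : r ≠ "" := pvVal_ne_empty key dflt reqs r (hl ▸ hrl)
    simp [pvOrStr, this, hbr]

-- B's result as a literal three-field list
lemma pvAlt_items (reqs : List (List (String × List (String × String)))) :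
    extract_volere_from_requirements_alt reqs =
      [("goal", (match (reqs.foldl (pvBStep "goal" "Not stated") (PySem.Dict.empty, none, 0)).2.1 with
                 | none => "Not stated" | some b => b)),
       ("context", (match (reqs.foldl (pvBStep "context" "Not asked") (PySem.Dict.empty, none, 0)).2.1 with
                 | none => "Not asked" | some b => b)),
       ("stakeholder", (match (reqs.foldl (pvBStep "stakeholder" "Unknown") (PySem.Dict.empty, none, 0)).2.1 with
                 | none => "Unknown" | some b => b))] := by
  simp [extract_volere_from_requirements_alt, PySem.Dict.insert, PySem.Dict.empty,
    PySem.Dict.contains]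

-- ===== VERDICT (by name: the statement is the Claim_ definition above) =====
theorem extract_volere_from_requirements_spec : Claim_equal_extract_volere_from_requirements := by
  intro reqs _
  unfold Spec_extract_volere_from_requirements
  rw [pvAlt_items]
  by_cases hnil : reqs = []
  · subst hnil; rfl
  · unfold extract_volere_from_requirements
    rw [if_neg hnil]
    simp only [pvFoldA_split]
    rw [pvField_eq, pvField_eq, pvField_eq]
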